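-- pv_equiv track=rewrite | github.com/ilya-maltsev/waffy | learn/waffy_learn/patterns.py | _segment_pattern
-- ===== SOURCE A (Python) =====
-- def _segment_pattern(values: list[str]) -> str:
--     """Generate a regex for a single segment (no separators)."""
--     if not values or all(v == "" for v in values):
--         return ""
--
--     has_alpha = any(c.isalpha() for v in values for c in v)
--     has_upper = any(c.isupper() for v in values for c in v)
--     has_lower = any(c.islower() for v in values for c in v)
--     has_digit = any(c.isdigit() for v in values for c in v)
--     all_digit = all(c.isdigit() for v in values for c in v if v)
--
--     lengths = [len(v) for v in values if v]
--     if not lengths: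
--         return ""
--
--     min_len = min(lengths)
--     max_len = max(lengths)
--
--     if all_digit:
--         if min_len == max_len:
--             return f"\\d{{{min_len}}}"
--         return f"\\d{{{min_len},{max_len}}}"
--
--     # Build character class
--     parts = []
--     if has_upper and has_lower:
--         parts.append("a-zA-Z")
--     elif has_lower:
--         parts.append("a-z")
--     elif has_upper:
--         parts.append("A-Z")
--     if has_digit:
--         parts.append("0-9")
--
--     charset = "".join(parts)
--     if min_len == max_len:
--         return f"[{charset}]{{{min_len}}}"
--     return f"[{charset}]{{{min_len},{max_len}}}"
-- ===== SOURCE B (Python) =====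
-- def _segment_pattern(values: list[str]) -> str:
--     """Generate a regex for a single segment (no separators)."""
--     # Category-set formulation: classify each character into one of four
--     # categories, collect the SET of categories present, look the charset up
--     # in an 8-entry table indexed by category bits, sort the non-empty
--     # lengths once and read the bounds off the ends, and assemble the
--     # result as one body + quantifier instead of four format branches.
--     chars = [c for v in values for c in v]
--     if not chars:
--         return ""
--     cats = {"U" if c.isupper() else
--             "L" if c.islower() else
--             "D" if c.isdigit() else "O" for c in chars}
--     lengths = sorted(len(v) for v in values if v)
--     lo, hi = lengths[0], lengths[-1]
--     if cats == {"D"}: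
--         body = "\\d"
--     else:
--         idx = 4 * ("L" in cats) + 2 * ("U" in cats) + ("D" in cats)
--         body = "[" + ["", "0-9", "A-Z", "A-Z0-9",
--                       "a-z", "a-z0-9", "a-zA-Z", "a-zA-Z0-9"][idx] + "]"
--     return body + ("{%d}" % lo if lo == hi else "{%d,%d}" % (lo, hi))
-- ===== Notes on version B (the rewrite author's own statement) =====
-- stated objective: alternative
-- what changed: Replaces the five any/all flag scans and the min()/max() over a lengths list by a character-category SET (each char classified into U/L/D/O once), an 8-entry charset table indexed by the category bits, a single sort of the non-empty lengths with the bounds read off its ends, and one unified body+quantifier assembly instead of four format branches.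
import Mathlib
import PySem

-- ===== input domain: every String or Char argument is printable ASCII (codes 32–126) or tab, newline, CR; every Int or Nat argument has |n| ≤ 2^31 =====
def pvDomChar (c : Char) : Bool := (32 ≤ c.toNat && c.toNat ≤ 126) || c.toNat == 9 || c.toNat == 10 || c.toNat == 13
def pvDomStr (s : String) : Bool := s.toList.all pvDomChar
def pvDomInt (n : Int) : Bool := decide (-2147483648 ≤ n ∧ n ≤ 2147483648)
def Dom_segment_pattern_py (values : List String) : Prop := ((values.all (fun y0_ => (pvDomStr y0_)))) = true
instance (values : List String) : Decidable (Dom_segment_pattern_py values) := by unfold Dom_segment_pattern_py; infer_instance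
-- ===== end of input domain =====

-- B reformulates A: a character-category SET (U/L/D/O per char) with an 8-entry charset
-- table indexed by the category bits, a single sort of the non-empty lengths with the
-- bounds read off its ends, and one unified body+quantifier assembly; same return value.

-- ===== PORT A =====
def segment_pattern_py (values : List String) : String :=
  if values = [] ∨ values.all (fun v => v == "") then ""
  else
    let allChars := values.flatMap (fun v => v.toList)
    let has_upper := allChars.any PySem.Chars.isupper
    let has_lower := allChars.any PySem.Chars.islower
    let has_digit := allChars.any PySem.Chars.isdigit
    let all_digit := (values.flatMap (fun v => if v == "" then [] else v.toList)).all PySem.Chars.isdigit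
    let lengths := (values.filter (fun v => !(v == ""))).map PySem.Str.len
    if lengths = [] then ""
    else
      let min_len := (PySem.List.min? lengths (fun y => y)).getD 0
      let max_len := (PySem.List.max? lengths (fun y => y)).getD 0
      if all_digit then
        if min_len = max_len then "\\d{" ++ PySem.Int.toStr min_len ++ "}"
        else "\\d{" ++ PySem.Int.toStr min_len ++ "," ++ PySem.Int.toStr max_len ++ "}"
      else
        let parts : List String :=
          (if has_upper && has_lower then ["a-zA-Z"]
           else if has_lower then ["a-z"]
           else if has_upper then ["A-Z"]
           else []) ++ (if has_digit then ["0-9"] else [])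
        let charset := PySem.Str.join "" parts
        if min_len = max_len then "[" ++ charset ++ "]{" ++ PySem.Int.toStr min_len ++ "}"
        else "[" ++ charset ++ "]{" ++ PySem.Int.toStr min_len ++ "," ++ PySem.Int.toStr max_len ++ "}"

-- ===== PORT B =====
-- the category of one character: "U"/"L"/"D"/"O"
def pvCatOf (c : Char) : String :=
  if PySem.Chars.isupper c then "U"
  else if PySem.Chars.islower c then "L"
  else if PySem.Chars.isdigit c then "D"
  else "O"

def pvCharsetTable : List String :=
  ["", "0-9", "A-Z", "A-Z0-9", "a-z", "a-z0-9", "a-zA-Z", "a-zA-Z0-9"]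

def segment_pattern_py_alt (values : List String) : String :=
  let chars := values.flatMap (fun v => v.toList)
  if chars = [] then ""
  else
    let cats : PySem.Set String := PySem.Set.ofList (chars.map pvCatOf)
    let lengths := PySem.List.sorted ((values.filter (fun v => !(v == ""))).map PySem.Str.len) (fun y => y)
    let lo := (PySem.List.pyGet? lengths 0).getD 0
    let hi := (PySem.List.pyGet? lengths (-1)).getD 0
    let body :=
      if PySem.Set.equal cats (PySem.Set.ofList ["D"]) then "\\d"
      else
        let idx : Int := 4 * (if PySem.Set.contains cats "L" then 1 else 0)
          + 2 * (if PySem.Set.contains cats "U" then 1 else 0)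
          + (if PySem.Set.contains cats "D" then 1 else 0)
        "[" ++ (PySem.List.pyGet? pvCharsetTable idx).getD "" ++ "]"
    body ++ (if lo = hi then "{" ++ PySem.Int.toStr lo ++ "}"
             else "{" ++ PySem.Int.toStr lo ++ "," ++ PySem.Int.toStr hi ++ "}")

-- ===== PRECONDITION & SPEC =====
def Spec_segment_pattern_py (values : List String) (out : String) : Prop := out = segment_pattern_py_alt values
instance (values : List String) (out : String) : Decidable (Spec_segment_pattern_py values out) := by unfold Spec_segment_pattern_py; infer_instance

-- ===== CLAIM (what is proved, stated in full; the proofs are below) =====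
def Claim_equal_segment_pattern_py : Prop := ∀ (values : List String), Dom_segment_pattern_py values → Spec_segment_pattern_py values (segment_pattern_py values)

-- ===== LEMMAS AND PROOFS =====

-- category ranges are disjoint
theorem pv_digit_not_alpha (c : Char) : PySem.Chars.isdigit c = true →
    PySem.Chars.isupper c = false ∧ PySem.Chars.islower c = false := by
  simp [PySem.Chars.isdigit, PySem.Chars.isupper, PySem.Chars.islower, Char.le_def,
    UInt32.le_iff_toNat_le]
  omega

theorem pv_upper_not_lower (c : Char) : PySem.Chars.isupper c = true →
    PySem.Chars.islower c = false := by
  simp [PySem.Chars.isupper, PySem.Chars.islower, Char.le_def, UInt32.le_iff_toNat_le]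
  omega

theorem pv_cat_U (c : Char) : pvCatOf c = "U" ↔ PySem.Chars.isupper c = true := by
  unfold pvCatOf; split_ifs with h1 h2 h3 <;> simp_all

theorem pv_cat_L (c : Char) : pvCatOf c = "L" ↔ PySem.Chars.islower c = true := by
  unfold pvCatOf
  by_cases h1 : PySem.Chars.isupper c = true
  · simp [h1, pv_upper_not_lower c h1]
  · simp only [h1, Bool.false_eq_true, if_false]
    split_ifs with h2 h3 <;> simp_all

theorem pv_cat_D (c : Char) : pvCatOf c = "D" ↔ PySem.Chars.isdigit c = true := by
  unfold pvCatOf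
  by_cases hd : PySem.Chars.isdigit c = true
  · rcases pv_digit_not_alpha c hd with ⟨h1, h2⟩; simp [h1, h2, hd]
  · split_ifs with h1 h2 <;> simp_all

theorem pv_contains_cats (chars : List Char) (k : String) (f : Char → Bool)
    (hk : ∀ c, pvCatOf c = k ↔ f c = true) :
    PySem.Set.contains (PySem.Set.ofList (chars.map pvCatOf)) k = chars.any f := by
  rw [Bool.eq_iff_iff, PySem.Set.contains_iff, PySem.Set.mem_ofList, List.any_eq_true]
  simp only [List.mem_map]
  constructor
  · rintro ⟨c, hc, hcat⟩; exact ⟨c, hc, (hk c).mp hcat⟩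
  · rintro ⟨c, hc, hf⟩; exact ⟨c, hc, (hk c).mpr hf⟩

theorem pv_equal_D (chars : List Char) (h : chars ≠ []) :
    PySem.Set.equal (PySem.Set.ofList (chars.map pvCatOf)) (PySem.Set.ofList ["D"])
      = chars.all PySem.Chars.isdigit := by
  rw [Bool.eq_iff_iff, PySem.Set.equal_iff, List.all_eq_true]
  constructor
  · intro he c hc
    have : pvCatOf c ∈ PySem.Set.ofList ["D"] := by
      exact (he (pvCatOf c)).mp ((PySem.Set.mem_ofList _ _).mpr (List.mem_map_of_mem hc))
    have : pvCatOf c = "D" := by simpa [PySem.Set.mem_ofList] using this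
    exact (pv_cat_D c).mp this
  · intro ha x
    simp only [PySem.Set.mem_ofList, List.mem_map, List.mem_singleton]
    constructor
    · rintro ⟨c, hc, rfl⟩; exact (pv_cat_D c).mpr (ha c hc)
    · rintro rfl
      rcases chars with _ | ⟨c, t⟩
      · exact absurd rfl h
      · exact ⟨c, List.mem_cons_self, (pv_cat_D c).mpr (ha c List.mem_cons_self)⟩

theorem pv_flatMap_if (vs : List String) :
    vs.flatMap (fun v => if v == "" then [] else v.toList) = vs.flatMap (fun v => v.toList) := by
  induction vs with
  | nil => rfl
  | cons v t ih =>
      simp only [List.flatMap_cons, ih]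
      by_cases hv : v = ""
      · subst hv; rfl
      · simp [hv]

theorem pv_sorted_head (x : Int) (t : List Int) {m : Int} {tt : List Int}
    (hs : PySem.List.sorted (x :: t) (fun y => y) false = m :: tt) :
    m = t.foldl min x := by
  have hmle : ∀ y ∈ x :: t, m ≤ y := PySem.List.key_head_sorted_le _ _ hs
  have hmem : m ∈ x :: t := by
    rw [← PySem.List.mem_sorted (x :: t) (fun y => y) false, hs]; exact List.mem_cons_self
  have h1 : t.foldl min x ≤ m := by
    rcases List.mem_cons.mp hmem with h' | h'
    · rw [h']; exact (PySem.List.foldl_min_le t x).1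
    · exact (PySem.List.foldl_min_le t x).2 m h'
  have h2 : m ≤ t.foldl min x := by
    rcases PySem.List.foldl_min_mem t x with h | h
    · rw [h]; exact hmle x List.mem_cons_self
    · exact hmle _ (List.mem_cons_of_mem x h)
  omega

theorem pv_sorted_last (x : Int) (t : List Int) {m : Int} {tt : List Int}
    (hs : PySem.List.sorted (x :: t) (fun y => y) false = m :: tt) :
    (m :: tt).getLast (by simp) = t.foldl max x := by
  have hlen : (m :: tt).length = (x :: t).length := by
    rw [← hs, PySem.List.length_sorted]
  have hlastmem : (m :: tt).getLast (by simp) ∈ x :: t := by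
    rw [← PySem.List.mem_sorted (x :: t) (fun y => y) false, hs]
    exact List.getLast_mem _
  have h1 : (m :: tt).getLast (by simp) ≤ t.foldl max x := by
    rcases List.mem_cons.mp hlastmem with h' | h'
    · rw [h']; exact (PySem.List.le_foldl_max t x).1
    · exact (PySem.List.le_foldl_max t x).2 _ h'
  have h2 : t.foldl max x ≤ (m :: tt).getLast (by simp) := by
    have hmem : t.foldl max x ∈ PySem.List.sorted (x :: t) (fun y => y) false := by
      rw [PySem.List.mem_sorted]
      rcases PySem.List.foldl_max_mem t x with h | h
      · rw [h]; exact List.mem_cons_self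
      · exact List.mem_cons_of_mem x h
    rcases List.mem_iff_getElem.mp hmem with ⟨p, hp, hpe⟩
    have hq : (x :: t).length - 1 < (PySem.List.sorted (x :: t) (fun y => y) false).length := by
      rw [PySem.List.length_sorted]; simp
    have hmono := PySem.List.sorted_id_getElem_mono (x :: t)
      (p := p) (q := (x :: t).length - 1) (by rw [PySem.List.length_sorted] at hp; omega) hq
    rw [hpe] at hmono
    have hlast : (m :: tt).getLast (by simp)
        = (PySem.List.sorted (x :: t) (fun y => y) false)[(x :: t).length - 1]'hq := by
      rw [List.getLast_eq_getElem]
      congr 1 <;> simp [hs, hlen.symm]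
    rw [hlast]
    exact hmono
  omega

theorem pv_main (values : List String) : segment_pattern_py values = segment_pattern_py_alt values := by
  unfold segment_pattern_py segment_pattern_py_alt
  by_cases hc : values.flatMap (fun v => v.toList) = []
  · -- every value is empty: both sides return ""
    have hall : ∀ v ∈ values, v = "" := by
      intro v hv
      have := List.flatMap_eq_nil_iff.mp hc v hv
      exact String.toList_eq_nil_iff.mp this
    have hguard : values = [] ∨ values.all (fun v => v == "") = true := by
      right; simp only [List.all_eq_true]; intro v hv; simp [hall v hv]
    rw [if_pos hguard, if_pos hc]
  · -- some character exists
    have hguard : ¬(values = [] ∨ values.all (fun v => v == "") = true) := by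
      rintro (h | h)
      · subst h; exact hc rfl
      · apply hc
        rw [List.flatMap_eq_nil_iff]
        intro v hv
        have : v = "" := by simpa using List.all_eq_true.mp h v hv
        simp [this]
    have hLne : (values.filter (fun v => !(v == ""))).map PySem.Str.len ≠ [] := by
      intro h0
      apply hc
      rw [List.flatMap_eq_nil_iff]
      intro v hv
      have hfe : values.filter (fun v => !(v == "")) = [] := by simpa using h0
      have hve : v = "" := by
        by_contra hne
        have : v ∈ values.filter (fun v => !(v == "")) := by
          rw [List.mem_filter]; exact ⟨hv, by simp [hne]⟩
        simp [hfe] at this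
      simp [hve]
    rcases hL : (values.filter (fun v => !(v == ""))).map PySem.Str.len with _ | ⟨x, t⟩
    · exact absurd hL hLne
    rcases hs : PySem.List.sorted (x :: t) (fun y => y) false with _ | ⟨m, tt⟩
    · exact absurd hs (by simp [PySem.List.sorted_eq_nil_iff])
    have hmin := pv_sorted_head x t hs
    have hmax := pv_sorted_last x t hs
    have hcontU := pv_contains_cats (values.flatMap (fun v => v.toList)) "U" _ pv_cat_U
    have hcontL := pv_contains_cats (values.flatMap (fun v => v.toList)) "L" _ pv_cat_L
    have hcontD := pv_contains_cats (values.flatMap (fun v => v.toList)) "D" _ pv_cat_D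
    have hequal := pv_equal_D (values.flatMap (fun v => v.toList)) hc
    have hgl : (m :: tt).getLast? = some (t.foldl max x) := by
      rw [List.getLast?_eq_some_getLast (by simp)]; exact congrArg some hmax
    simp only [if_neg hguard, if_neg hc, pv_flatMap_if,
      PySem.List.min?_id_cons, PySem.List.max?_id_cons, Option.getD_some,
      PySem.List.pyGet?_zero_cons, PySem.List.pyGet?_neg_one, hgl,
      hcontU, hcontL, hcontD, hequal, ← hmin, reduceCtorEq, if_false]
    by_cases had : (values.flatMap (fun v => v.toList)).all PySem.Chars.isdigit = true
    · simp only [had, if_true,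
        show ("\\d{" : String) = "\\d" ++ "{" from rfl, String.append_assoc]
      split_ifs <;> rfl
    · have j1 : PySem.Str.join "" (["a-zA-Z"] ++ ["0-9"]) = "a-zA-Z0-9" := by decide
      have j2 : PySem.Str.join "" (["a-zA-Z"] ++ []) = "a-zA-Z" := by decide
      have j3 : PySem.Str.join "" (["a-z"] ++ ["0-9"]) = "a-z0-9" := by decide
      have j4 : PySem.Str.join "" (["a-z"] ++ []) = "a-z" := by decide
      have j5 : PySem.Str.join "" (["A-Z"] ++ ["0-9"]) = "A-Z0-9" := by decide
      have j6 : PySem.Str.join "" (["A-Z"] ++ []) = "A-Z" := by decide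
      have j7 : PySem.Str.join "" (([] : List String) ++ ["0-9"]) = "0-9" := by decide
      have j8 : PySem.Str.join "" (([] : List String) ++ []) = "" := by decide
      have t0 : (PySem.List.pyGet? pvCharsetTable 0).getD "" = "" := by decide
      have t1 : (PySem.List.pyGet? pvCharsetTable 1).getD "" = "0-9" := by decide
      have t2 : (PySem.List.pyGet? pvCharsetTable 2).getD "" = "A-Z" := by decide
      have t3 : (PySem.List.pyGet? pvCharsetTable 3).getD "" = "A-Z0-9" := by decide
      have t4 : (PySem.List.pyGet? pvCharsetTable 4).getD "" = "a-z" := by decide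
      have t5 : (PySem.List.pyGet? pvCharsetTable 5).getD "" = "a-z0-9" := by decide
      have t6 : (PySem.List.pyGet? pvCharsetTable 6).getD "" = "a-zA-Z" := by decide
      have t7 : (PySem.List.pyGet? pvCharsetTable 7).getD "" = "a-zA-Z0-9" := by decide
      simp only [had, Bool.false_eq_true, if_false]
      by_cases hu : (values.flatMap (fun v => v.toList)).any PySem.Chars.isupper = true <;>
        by_cases hl : (values.flatMap (fun v => v.toList)).any PySem.Chars.islower = true <;>
          by_cases hd : (values.flatMap (fun v => v.toList)).any PySem.Chars.isdigit = true <;>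
            simp only [hu, hl, hd, Bool.true_and, Bool.false_and, Bool.and_self,
              Bool.false_eq_true, if_true, if_false] <;>
              norm_num <;>
                simp only [j1, j2, j3, j4, j5, j6, j7, j8, t0, t1, t2, t3, t4, t5, t6, t7,
                  show ("]{" : String) = "]" ++ "{" from rfl, String.append_assoc] <;>
                  split_ifs <;> rfl

-- ===== VERDICT (by name: the statement is the Claim_ definition above) =====
theorem segment_pattern_py_spec : Claim_equal_segment_pattern_py := by
  intro values _
  unfold Spec_segment_pattern_py
  exact pv_main values
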